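-- pv_equiv track=rewrite | github.com/689photo/coding_test_python | 프로그래머스/1/12930. 이상한 문자 만들기/이상한 문자 만들기.py | solution
-- ===== SOURCE A (Python) =====
-- def solution(s):
--     result = ''
--     s = list(s)
--     temp = 0
--
--     for i in s:
--         if result and result[-1] == ' ':
--             temp = 0
--             result += i.upper()
--         else:
--             if temp % 2 == 0:
--                     result += i.upper()
--             else:
--                 result += i.lower()
--         temp += 1
--     return result
-- ===== SOURCE B (Python) =====
-- def solution(s):
--     return ' '.join(
--         ''.join(c.upper() if i % 2 == 0 else c.lower() for i, c in enumerate(w))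
--         for w in s.split(' ')
--     )
-- ===== Notes on version B (the rewrite author's own statement) =====
-- stated objective: idiomatic
-- what changed: Replaced A's single character-by-character pass with a running counter and a last-appended-character boundary check by an idiomatic split-on-space / per-word enumerate upper-lower / join pipeline.
import Mathlib
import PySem

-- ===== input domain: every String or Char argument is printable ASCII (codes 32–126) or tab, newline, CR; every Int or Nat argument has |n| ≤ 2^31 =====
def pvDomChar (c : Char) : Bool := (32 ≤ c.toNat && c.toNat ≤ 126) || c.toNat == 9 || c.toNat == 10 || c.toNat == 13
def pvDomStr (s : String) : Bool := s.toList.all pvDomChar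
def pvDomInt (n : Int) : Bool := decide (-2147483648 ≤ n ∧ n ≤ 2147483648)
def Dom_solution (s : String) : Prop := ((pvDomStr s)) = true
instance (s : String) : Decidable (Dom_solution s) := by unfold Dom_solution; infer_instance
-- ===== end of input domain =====

-- B replaces A's single counting pass (running counter + result[-1] boundary check) with an
-- idiomatic split(' ') / per-word enumerate upper-lower / join pipeline.

-- ===== PORT A =====
-- literal port of A's loop: state is (result, temp); the Python guard
-- `result and result[-1] == ' '` is `result.getLast? = some ' '` (an empty result has no last).
def solution (s : String) : String :=
  String.ofList
    (s.toList.foldl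
      (fun (st : List Char × Int) i =>
        let result := st.1
        let temp := st.2
        if result.getLast? = some ' ' then
          let temp := (0 : Int)
          (result ++ [PySem.Chars.upperChar i], temp + 1)
        else if PySem.Int.mod temp 2 = 0 then
          (result ++ [PySem.Chars.upperChar i], temp + 1)
        else
          (result ++ [PySem.Chars.lowerChar i], temp + 1))
      ([], 0)).1

-- ===== PORT B =====
-- per-word rebuild: even index upper, odd index lower (the generator inside B's join)
def procWord (w : List Char) : List Char :=
  (PySem.List.enumerate w).map
    (fun p => if PySem.Int.mod p.1 2 = 0 then PySem.Chars.upperChar p.2 else PySem.Chars.lowerChar p.2)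

def solution_alt (s : String) : String :=
  String.ofList (PySem.Chars.join [' '] ((PySem.Chars.splitOn s.toList [' ']).map procWord))

-- ===== PRECONDITION & SPEC =====
def Spec_solution (s : String) (out : String) : Prop := out = solution_alt s
instance (s : String) (out : String) : Decidable (Spec_solution s out) := by unfold Spec_solution; infer_instance

-- ===== CLAIM (what is proved, stated in full; the proofs are below) =====
def Claim_equal_solution : Prop := ∀ (s : String), Dom_solution s → Spec_solution s (solution s)

-- ===== LEMMAS AND PROOFS =====

-- the transformation A applies to the character at running counter t
def stepC (t : Int) (c : Char) : Char :=
  if PySem.Int.mod t 2 = 0 then PySem.Chars.upperChar c else PySem.Chars.lowerChar c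

-- A's loop, rephrased as a structural recursion producing only the appended suffix;
-- the Bool is "the previously appended character was a space"
def gA : List Char → Bool → Int → List Char
  | [], _, _ => []
  | c :: cs, true, _ => PySem.Chars.upperChar c :: gA cs (c == ' ') 1
  | c :: cs, false, t => stepC t c :: gA cs (c == ' ') (t + 1)

-- structural form of splitOn for the single-character separator ' '
def spw : List Char → List (List Char)
  | [] => [[]]
  | c :: cs => if c = ' ' then [] :: spw cs else (spw cs).modifyHead (c :: ·)

-- B's per-word transform, started at index i
def pw (w : List Char) (i : Int) : List Char :=
  (PySem.List.enumerate w i).map (fun p => stepC p.1 p.2)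

-- rendering of the non-first words: each preceded by one space
def tr (ws : List (List Char)) : List Char :=
  (ws.map (fun w => ' ' :: pw w 0)).flatten

lemma upperChar_space_iff (c : Char) : (PySem.Chars.upperChar c = ' ') ↔ c = ' ' := by
  unfold PySem.Chars.upperChar PySem.Chars.islower
  split
  · rename_i h
    simp only [Bool.and_eq_true, decide_eq_true_eq] at h
    obtain ⟨h1, h2⟩ := h
    rw [Char.le_def, UInt32.le_iff_toNat_le] at h1 h2
    have ha : ('a'.val.toNat : Nat) = 97 := by decide
    have hz : ('z'.val.toNat : Nat) = 122 := by decide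
    rw [ha] at h1; rw [hz] at h2
    have hcv : c.val.toNat = c.toNat := rfl
    rw [hcv] at h1 h2
    have hv : (c.toNat - 32).isValidChar := Or.inl (by omega)
    constructor
    · intro he
      have ht := congrArg Char.toNat he
      rw [Char.toNat_ofNat, if_pos hv] at ht
      have hsp : (' ').toNat = 32 := by decide
      rw [hsp] at ht
      omega
    · intro he
      subst he
      exact absurd h1 (by decide)
  · exact Iff.rfl

lemma lowerChar_space_iff (c : Char) : (PySem.Chars.lowerChar c = ' ') ↔ c = ' ' := by
  unfold PySem.Chars.lowerChar PySem.Chars.isupper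
  split
  · rename_i h
    simp only [Bool.and_eq_true, decide_eq_true_eq] at h
    obtain ⟨h1, h2⟩ := h
    rw [Char.le_def, UInt32.le_iff_toNat_le] at h1 h2
    have ha : ('A'.val.toNat : Nat) = 65 := by decide
    have hz : ('Z'.val.toNat : Nat) = 90 := by decide
    rw [ha] at h1; rw [hz] at h2
    have hcv : c.val.toNat = c.toNat := rfl
    rw [hcv] at h1 h2
    have hv : (c.toNat + 32).isValidChar := Or.inl (by omega)
    constructor
    · intro he
      have ht := congrArg Char.toNat he
      rw [Char.toNat_ofNat, if_pos hv] at ht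
      have hsp : (' ').toNat = 32 := by decide
      rw [hsp] at ht
      omega
    · intro he
      subst he
      exact absurd h1 (by decide)
  · exact Iff.rfl

lemma stepC_space_iff (t : Int) (c : Char) : (stepC t c = ' ') ↔ c = ' ' := by
  unfold stepC; split
  · exact upperChar_space_iff c
  · exact lowerChar_space_iff c

lemma stepC_space (t : Int) : stepC t ' ' = ' ' := (stepC_space_iff t ' ').mpr rfl

lemma stepC_zero (c : Char) : stepC 0 c = PySem.Chars.upperChar c := by
  unfold stepC; simp [PySem.Int.mod]

lemma foldA (cs : List Char) : ∀ (res : List Char) (t : Int),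
    (cs.foldl
      (fun (st : List Char × Int) i =>
        let result := st.1
        let temp := st.2
        if result.getLast? = some ' ' then
          let temp := (0 : Int)
          (result ++ [PySem.Chars.upperChar i], temp + 1)
        else if PySem.Int.mod temp 2 = 0 then
          (result ++ [PySem.Chars.upperChar i], temp + 1)
        else
          (result ++ [PySem.Chars.lowerChar i], temp + 1))
      (res, t)).1
    = res ++ gA cs (res.getLast? == some ' ') t := by
  induction cs with
  | nil => intro res t; simp [gA]
  | cons c cs ih =>
    intro res t
    have hbU : ((some (PySem.Chars.upperChar c) == some ' ') : Bool) = (c == ' ') := by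
      by_cases hc : c = ' '
      · simp [hc, (upperChar_space_iff ' ').mpr rfl]
      · have hne : PySem.Chars.upperChar c ≠ ' ' := fun h' => hc ((upperChar_space_iff c).mp h')
        simp [hc, hne]
    have hbL : ((some (PySem.Chars.lowerChar c) == some ' ') : Bool) = (c == ' ') := by
      by_cases hc : c = ' '
      · simp [hc, (lowerChar_space_iff ' ').mpr rfl]
      · have hne : PySem.Chars.lowerChar c ≠ ' ' := fun h' => hc ((lowerChar_space_iff c).mp h')
        simp [hc, hne]
    by_cases h : res.getLast? = some ' '
    · have htrue : ((res.getLast? == some ' ') : Bool) = true := by simp [h]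
      simp only [List.foldl_cons, if_pos h]
      rw [ih]
      simp only [List.getLast?_concat]
      rw [hbU, htrue]
      simp [gA]
    · simp only [List.foldl_cons, if_neg h]
      have hfalse : ((res.getLast? == some ' ') : Bool) = false := by
        simpa using h
      by_cases hm : PySem.Int.mod t 2 = 0
      · have hst : stepC t c = PySem.Chars.upperChar c := by unfold stepC; rw [if_pos hm]
        simp only [if_pos hm]
        rw [ih]
        simp only [List.getLast?_concat]
        rw [hbU, hfalse]
        simp [gA, hst]
      · have hst : stepC t c = PySem.Chars.lowerChar c := by unfold stepC; rw [if_neg hm]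
        simp only [if_neg hm]
        rw [ih]
        simp only [List.getLast?_concat]
        rw [hbL, hfalse]
        simp [gA, hst]

lemma spw_shape (cs : List Char) : ∃ w ws, spw cs = w :: ws := by
  induction cs with
  | nil => exact ⟨[], [], rfl⟩
  | cons c cs ih =>
    obtain ⟨w, ws, hws⟩ := ih
    by_cases hc : c = ' '
    · exact ⟨[], spw cs, by simp [spw, hc]⟩
    · exact ⟨c :: w, ws, by simp [spw, hc, hws, List.modifyHead]⟩

lemma splitOn_go_space (fuel : Nat) : ∀ (l cur : List Char) (acc : List (List Char)),
    l.length < fuel →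
    PySem.Chars.splitOn.go [' '] fuel l cur acc
      = acc.reverse ++ (spw l).modifyHead (cur.reverse ++ ·) := by
  induction fuel with
  | zero => intro l cur acc h; omega
  | succ fuel ih =>
    intro l cur acc h
    cases l with
    | nil => simp [PySem.Chars.splitOn.go, spw, List.modifyHead]
    | cons c rest =>
      by_cases hc : c = ' '
      · subst hc
        have hpre : ([' '].isPrefixOf (' ' :: rest)) = true := by simp [List.isPrefixOf]
        rw [PySem.Chars.splitOn.go]
        simp only [hpre, if_pos]
        have hdrop : List.drop [' '].length (' ' :: rest) = rest := rfl
        rw [hdrop]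
        rw [ih rest [] (cur.reverse :: acc) (by simpa using Nat.lt_of_succ_lt_succ h)]
        obtain ⟨w, ws, hs⟩ := spw_shape rest
        simp [spw, hs, List.modifyHead]
      · have hpre : ([' '].isPrefixOf (c :: rest)) = false := by
          simp [List.isPrefixOf, BEq.beq]
          intro hh; exact absurd hh.symm hc
        rw [PySem.Chars.splitOn.go]
        simp only [hpre]
        rw [if_neg (by simp)]
        rw [ih rest (c :: cur) acc (by simpa using Nat.lt_of_succ_lt_succ h)]
        obtain ⟨w, ws, hs⟩ := spw_shape rest
        simp [spw, hs, hc, List.modifyHead]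

lemma splitOn_space (cs : List Char) : PySem.Chars.splitOn cs [' '] = spw cs := by
  unfold PySem.Chars.splitOn
  rw [splitOn_go_space (cs.length + 1) cs [] [] (by omega)]
  obtain ⟨w, ws, hs⟩ := spw_shape cs
  simp [hs, List.modifyHead]

lemma gA_true (cs : List Char) (t : Int) : gA cs true t = gA cs false 0 := by
  cases cs with
  | nil => rfl
  | cons c cs => simp [gA, stepC_zero]

lemma gA_key (cs : List Char) : ∀ (t : Int),
    gA cs false t = pw (spw cs).headI t ++ tr (spw cs).tail := by
  induction cs with
  | nil => intro t; simp [gA, spw, pw, tr]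
  | cons c cs ih =>
    intro t
    by_cases hc : c = ' '
    · subst hc
      simp only [gA, spw]
      rw [stepC_space]
      have hbt : ((' ' == ' ') : Bool) = true := by decide
      rw [hbt, gA_true, ih 0]
      obtain ⟨w, ws, hs⟩ := spw_shape cs
      rw [hs]
      simp [pw, tr]
    · simp only [gA, spw, if_neg hc]
      have hbf : ((c == ' ') : Bool) = false := by simpa using hc
      rw [hbf, ih (t + 1)]
      obtain ⟨w, ws, hs⟩ := spw_shape cs
      rw [hs]
      simp [pw, tr, List.modifyHead, PySem.List.enumerate_cons]

lemma join_space (x : List Char) (ws : List (List Char)) :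
    PySem.Chars.join [' '] (x :: ws) = x ++ (ws.map (fun w => ' ' :: w)).flatten := by
  induction ws generalizing x with
  | nil => simp [PySem.Chars.join_singleton]
  | cons y ws ih =>
    rw [PySem.Chars.join_cons_cons, ih y]
    simp

lemma procWord_eq (w : List Char) : procWord w = pw w 0 := rfl

-- ===== VERDICT (by name: the statement is the Claim_ definition above) =====
theorem solution_spec : Claim_equal_solution := by
  intro s _
  unfold Spec_solution solution solution_alt
  rw [foldA]
  simp only [List.getLast?_nil, List.nil_append]
  have hnone : ((none == some ' ') : Bool) = false := by decide
  rw [hnone, gA_key, splitOn_space]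
  obtain ⟨w, ws, hs⟩ := spw_shape s.toList
  rw [hs]
  simp only [List.headI, List.tail_cons, List.map_cons]
  rw [join_space]
  simp [tr, List.map_map, Function.comp_def, procWord_eq]
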